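-- pv_equiv track=rewrite | github.com/remekozicki/ASD | EGZAMIN3/zad_B/egz3b.py | DFS
-- ===== SOURCE A (Python) =====
-- def create_turns():
--     # x, y
--     T = [[1,0], #G
--         [-1,0], #D
--         [0,1]]  #P
--     return T
--
-- def DFS(L):
--
--     n = len(L)
--     visited = [[False for _ in range(n)] for _ in range(n)]
--     distance = [[0 for _ in range(n)] for _ in range(n)]
--     for i in range(n):
--         for j in range(n):
--             if L[i][j] == '#':
--                 visited[i][j] = True
--
--     turn = create_turns()
--     x = 0
--     y = 0
--     rec(L,visited,distance,x,y,n)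
--     return distance[n-1][n-1]
--
-- def rec(L,visited,distance,x,y,n):
--
--     visited[x][y] = True
--
--     if x + 1 < n and not visited[x+1][y]:
--         distance[x+1][y] = distance[x][y] + 1
--         rec(L,visited,distance,x+1,y,n)
--
--     if x - 1 > -1 and not visited[x-1][y]:
--         distance[x-1][y] = distance[x][y] + 1
--         rec(L,visited,distance,x-1,y,n)
--
--     if y + 1 < n and not visited[x][y+1]:
--         distance[x][y+1] = distance[x][y] + 1
--         rec(L,visited,distance,x,y+1,n)
-- ===== SOURCE B (Python) =====
-- def DFS(L):
--     n = len(L)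
--     visited = [[c == '#' for c in row[:n]] for row in L]
--     distance = [[0] * n for _ in L]
--     DIRS = ((1, 0), (-1, 0), (0, 1))
--     visited[0][0] = True
--     stack = [(0, 0, 0)]
--     while stack:
--         x, y, k = stack[-1]
--         if k == 3:
--             stack.pop()
--             continue
--         stack[-1] = (x, y, k + 1)
--         dx, dy = DIRS[k]
--         nx, ny = x + dx, y + dy
--         if 0 <= nx < n and 0 <= ny < n and not visited[nx][ny]:
--             distance[nx][ny] = distance[x][y] + 1
--             visited[nx][ny] = True
--             stack.append((nx, ny, 0))
--     return distance[n - 1][n - 1]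
-- ===== Notes on version B (the rewrite author's own statement) =====
-- stated objective: alternative
-- what changed: The recursive DFS helper 'rec' is replaced by an iterative DFS over an explicit stack of (x, y, next-direction-index) frames, with visited/distance updates performed at the exact per-direction moments of the recursion; the '#'/zero grids are built by comprehensions instead of index loops.
import Mathlib
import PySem

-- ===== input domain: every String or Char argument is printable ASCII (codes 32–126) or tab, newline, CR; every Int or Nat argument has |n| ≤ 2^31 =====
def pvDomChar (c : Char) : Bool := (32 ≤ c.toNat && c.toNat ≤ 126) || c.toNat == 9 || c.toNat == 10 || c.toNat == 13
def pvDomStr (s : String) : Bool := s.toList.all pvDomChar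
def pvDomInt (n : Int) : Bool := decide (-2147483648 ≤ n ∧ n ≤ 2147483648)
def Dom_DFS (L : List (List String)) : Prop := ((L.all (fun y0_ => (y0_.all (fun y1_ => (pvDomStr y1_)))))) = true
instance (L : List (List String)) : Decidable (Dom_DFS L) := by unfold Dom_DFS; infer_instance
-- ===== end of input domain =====

-- B replaces the recursive DFS helper by an iterative DFS over an explicit stack of
-- (x, y, next-direction-index) frames, updating visited/distance at the same per-direction
-- moments as the recursion; grids are built by comprehensions instead of index loops.
-- (A mutates nothing observable by the caller: L itself is only read.)

-- 2-d grid read/write shared by both ports (visited[x][y], distance[x][y] with in-range indices)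
def g2get {α : Type} (g : List (List α)) (x y : Int) (d : α) : α :=
  (g.getD x.toNat []).getD y.toNat d

def g2set {α : Type} (g : List (List α)) (x y : Int) (a : α) : List (List α) :=
  g.set x.toNat ((g.getD x.toNat []).set y.toNat a)

-- ===== PORT A =====
-- rec(L,visited,distance,x,y,n); the fuel argument is a totality guard only:
-- lemma recA_fuel_indep below shows any fuel > cf(visited after the entry mark) gives the same result,
-- and DFS passes n*n+1 which is always sufficient.
def recA (f : Nat) (vis : List (List Bool)) (dist : List (List Int)) (x y n : Int) :
    List (List Bool) × List (List Int) :=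
  match f with
  | 0 => (vis, dist)
  | f + 1 =>
    let vis := g2set vis x y true
    let p1 := if x + 1 < n ∧ g2get vis (x + 1) y false = false then
        recA f vis (g2set dist (x + 1) y (g2get dist x y 0 + 1)) (x + 1) y n
      else (vis, dist)
    let p2 := if -1 < x - 1 ∧ g2get p1.1 (x - 1) y false = false then
        recA f p1.1 (g2set p1.2 (x - 1) y (g2get p1.2 x y 0 + 1)) (x - 1) y n
      else p1
    if y + 1 < n ∧ g2get p2.1 x (y + 1) false = false then
        recA f p2.1 (g2set p2.2 x (y + 1) (g2get p2.2 x y 0 + 1)) x (y + 1) n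
      else p2

-- visited-building loops of A: [[False]*n], then visited[i][j] = True where L[i][j] == '#'
def initVisA (L : List (List String)) : List (List Bool) :=
  (List.range L.length).foldl
    (fun v i => (List.range L.length).foldl
      (fun v j => if (L.getD i []).getD j "" = "#" then g2set v (↑i) (↑j) true else v) v)
    ((List.range L.length).map (fun _ => (List.range L.length).map (fun _ => false)))

def DFS (L : List (List String)) : Int :=
  let n : Int := L.length
  let distance := (List.range L.length).map (fun _ => (List.range L.length).map (fun _ => (0 : Int)))
  let r := recA (L.length * L.length + 1) (initVisA L) distance 0 0 n
  g2get r.2 (n - 1) (n - 1) 0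

-- ===== PORT B =====
def dirB (k : Nat) : Int × Int := if k = 0 then (1, 0) else if k = 1 then (-1, 0) else (0, 1)

-- the while loop of Source B; fuel is a totality guard only (4*n*n+4 is always sufficient: the
-- simulation lemma accounts each loop iteration against 4*cf(visited) + frame weights).
def runB (f : Nat) (stack : List (Int × Int × Nat)) (vis : List (List Bool))
    (dist : List (List Int)) (n : Int) : List (List Bool) × List (List Int) :=
  match f, stack with
  | 0, _ => (vis, dist)
  | _ + 1, [] => (vis, dist)
  | f + 1, (x, y, k) :: rest =>
    if k = 3 then runB f rest vis dist n
    else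
      let dd := dirB k
      let nx := x + dd.1
      let ny := y + dd.2
      if 0 ≤ nx ∧ nx < n ∧ 0 ≤ ny ∧ ny < n ∧ g2get vis nx ny false = false then
        runB f ((nx, ny, 0) :: (x, y, k + 1) :: rest) (g2set vis nx ny true)
          (g2set dist nx ny (g2get dist x y 0 + 1)) n
      else runB f ((x, y, k + 1) :: rest) vis dist n

def DFS_alt (L : List (List String)) : Int :=
  let n : Int := L.length
  let vis := g2set (L.map (fun row => (row.take L.length).map (fun c => c == "#"))) 0 0 true
  let r := runB (4 * L.length * L.length + 4) [(0, 0, 0)] vis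
    (L.map (fun _ => List.replicate L.length (0 : Int))) n
  g2get r.2 (n - 1) (n - 1) 0

-- ===== PRECONDITION & SPEC =====
-- Pre_ excludes exactly the inputs where the Python A raises IndexError: the empty grid
-- (rec immediately indexes visited[0][0]) and grids with a row shorter than len(L)
-- (the '#'-marking loop indexes L[i][j] for all i, j < n).
def Pre_DFS (L : List (List String)) : Prop :=
  0 < L.length ∧ ∀ r ∈ L, L.length ≤ r.length
instance (L : List (List String)) : Decidable (Pre_DFS L) := by unfold Pre_DFS; infer_instance

def pvWitness_DFS : List (List String) := [[".", "#"], [".", "."]]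

def Spec_DFS (L : List (List String)) (out : Int) : Prop := out = DFS_alt L
instance (L : List (List String)) (out : Int) : Decidable (Spec_DFS L out) := by unfold Spec_DFS; infer_instance

-- ===== CLAIM (what is proved, stated in full; the proofs are below) =====
def Claim_equal_DFS : Prop := ∀ (L : List (List String)), Dom_DFS L → Pre_DFS L → Spec_DFS L (DFS L)

-- ===== LEMMAS AND PROOFS =====

-- number of unvisited cells: the termination/fuel measure
def cf (v : List (List Bool)) : Nat := (v.map (fun r => r.count false)).sum

-- grid shape: an n × n grid
def shape2 {α : Type} (g : List (List α)) (n : Int) : Prop :=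
  g.length = n.toNat ∧ ∀ r ∈ g, r.length = n.toNat

-- stage decomposition of recA's body (proof-side only): stA f k = recA's body from branch k on,
-- WITHOUT the entry mark.
def branchA (f : Nat) (k : Nat) (v : List (List Bool)) (d : List (List Int)) (x y n : Int) :
    List (List Bool) × List (List Int) :=
  if k = 0 then
    (if x + 1 < n ∧ g2get v (x + 1) y false = false then
        recA f v (g2set d (x + 1) y (g2get d x y 0 + 1)) (x + 1) y n
      else (v, d))
  else if k = 1 then
    (if -1 < x - 1 ∧ g2get v (x - 1) y false = false then
        recA f v (g2set d (x - 1) y (g2get d x y 0 + 1)) (x - 1) y n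
      else (v, d))
  else
    (if y + 1 < n ∧ g2get v x (y + 1) false = false then
        recA f v (g2set d x (y + 1) (g2get d x y 0 + 1)) x (y + 1) n
      else (v, d))

def stA (f : Nat) (k : Nat) (v : List (List Bool)) (d : List (List Int)) (x y n : Int) :
    List (List Bool) × List (List Int) :=
  match k with
  | 0 =>
    let s1 := branchA f 0 v d x y n
    let s2 := branchA f 1 s1.1 s1.2 x y n
    branchA f 2 s2.1 s2.2 x y n
  | 1 =>
    let s2 := branchA f 1 v d x y n
    branchA f 2 s2.1 s2.2 x y n
  | 2 => branchA f 2 v d x y n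
  | _ => (v, d)

lemma recA_succ (f : Nat) (v : List (List Bool)) (d : List (List Int)) (x y n : Int) :
    recA (f + 1) v d x y n = stA f 0 (g2set v x y true) d x y n := by
  rfl

lemma stA_step (f k : Nat) (hk : k < 3) (v : List (List Bool)) (d : List (List Int)) (x y n : Int) :
    stA f k v d x y n =
      stA f (k + 1) (branchA f k v d x y n).1 (branchA f k v d x y n).2 x y n := by
  match k with
  | 0 => rfl
  | 1 => rfl
  | 2 => rfl

-- basic getD/set facts
lemma getD_set_self {a : Type} (l : List a) (i : Nat) (x d : a) (h : i < l.length) :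
    (l.set i x).getD i d = x := by
  simp [List.getD, h]

lemma getD_set_ne {a : Type} (l : List a) (i j : Nat) (x : a) (d : a) (h : i ≠ j) :
    (l.set i x).getD j d = l.getD j d := by
  simp [List.getD, List.getElem?_set_ne h]

lemma g2set_length {a : Type} (g : List (List a)) (x y : Int) (c : a) :
    (g2set g x y c).length = g.length := by
  simp [g2set]

lemma g2set_row_len {a : Type} (g : List (List a)) (x y : Int) (c : a) (i : Nat) :
    ((g2set g x y c).getD i []).length = (g.getD i []).length := by
  unfold g2set
  by_cases hx : x.toNat < g.length
  · by_cases hi : x.toNat = i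
    · subst hi; rw [getD_set_self _ _ _ _ hx]; simp
    · rw [getD_set_ne _ _ _ _ _ hi]
  · rw [List.set_eq_of_length_le (by omega)]

lemma shape2_g2set {a : Type} (g : List (List a)) (n x y : Int) (c : a) (h : shape2 g n) :
    shape2 (g2set g x y c) n := by
  by_cases hx : x.toNat < g.length
  · obtain ⟨h1, h2⟩ := h
    refine ⟨by rw [g2set_length]; exact h1, ?_⟩
    intro r hr
    unfold g2set at hr
    rcases List.mem_or_eq_of_mem_set hr with hm | he
    · exact h2 r hm
    · subst he
      have : (g.getD x.toNat []).length = n.toNat := by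
        rw [List.getD_eq_getElem g [] hx]; exact h2 _ (List.getElem_mem hx)
      simpa using this
  · unfold g2set; rw [List.set_eq_of_length_le (by omega)]; exact h

-- reading after a write, Nat coordinates
lemma g2get_g2set {a : Type} (g : List (List a)) (i j p q : Nat) (c d : a)
    (hi : i < g.length) (hj : j < (g.getD i []).length) :
    g2get (g2set g (↑i) (↑j) c) (↑p) (↑q) d =
      if p = i ∧ q = j then c else g2get g (↑p) (↑q) d := by
  unfold g2get g2set
  simp only [Int.toNat_natCast]
  by_cases hp : p = i
  · subst hp
    rw [getD_set_self _ _ _ _ hi]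
    by_cases hq : q = j
    · subst hq; rw [getD_set_self _ _ _ _ hj]; simp
    · rw [getD_set_ne _ _ _ _ _ (fun he => hq he.symm)]; simp [hq]
  · rw [getD_set_ne _ _ _ _ _ (fun he => hp he.symm)]
    simp [hp]

-- counting false entries
lemma count_false_set_true_le (l : List Bool) (j : Nat) :
    (l.set j true).count false ≤ l.count false := by
  induction l generalizing j with
  | nil => simp
  | cons a t ih =>
    cases j with
    | zero => cases a <;> simp
    | succ j => cases a <;> simpa using ih j

lemma count_false_set_true (l : List Bool) (j : Nat) (hj : j < l.length)
    (h : l.getD j false = false) :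
    (l.set j true).count false + 1 = l.count false := by
  induction l generalizing j with
  | nil => simp at hj
  | cons a t ih =>
    cases j with
    | zero => simp at h; subst h; simp
    | succ j =>
      simp only [List.set_cons_succ, List.count_cons]
      have := ih j (by simpa using hj) (by simpa using h)
      omega

lemma cf_set_row (v : List (List Bool)) (i : Nat) (r : List Bool) (h : i < v.length) :
    cf (v.set i r) + (v.getD i []).count false = cf v + r.count false := by
  induction v generalizing i with
  | nil => simp at h
  | cons a t ih =>
    cases i with
    | zero => simp [cf]; ring
    | succ i =>
      simp only [List.set_cons_succ, List.getD_cons_succ]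
      have := ih i (by simpa using h)
      simp only [cf, List.map_cons, List.sum_cons] at this ⊢
      omega

lemma cf_g2set_le (v : List (List Bool)) (x y : Int) :
    cf (g2set v x y true) ≤ cf v := by
  unfold g2set
  by_cases hx : x.toNat < v.length
  · have h := cf_set_row v x.toNat ((v.getD x.toNat []).set y.toNat true) hx
    have := count_false_set_true_le (v.getD x.toNat []) y.toNat
    omega
  · rw [List.set_eq_of_length_le (by omega)]

lemma cf_g2set_true (v : List (List Bool)) (x y : Int)
    (hx : x.toNat < v.length) (hy : y.toNat < (v.getD x.toNat []).length)
    (h : g2get v x y false = false) :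
    cf (g2set v x y true) + 1 = cf v := by
  unfold g2set
  have h1 := cf_set_row v x.toNat ((v.getD x.toNat []).set y.toNat true) hx
  have h2 := count_false_set_true (v.getD x.toNat []) y.toNat hy (by unfold g2get at h; exact h)
  omega

-- in-range row access under shape2
lemma row_len_of_shape2 (v : List (List Bool)) (n x : Int) (h : shape2 v n)
    (hx : x.toNat < v.length) : (v.getD x.toNat []).length = n.toNat := by
  rw [List.getD_eq_getElem v [] hx]
  exact h.2 _ (List.getElem_mem hx)

-- recA only marks cells and keeps the shape
lemma recA_facts (f : Nat) : ∀ (v : List (List Bool)) (d : List (List Int)) (x y n : Int),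
    cf (recA f v d x y n).1 ≤ cf v ∧
      (shape2 v n → shape2 (recA f v d x y n).1 n) := by
  induction f with
  | zero => intro v d x y n; exact ⟨le_refl _, fun h => h⟩
  | succ f ih =>
    intro v d x y n
    have hb : ∀ (k : Nat) (v' : List (List Bool)) (d' : List (List Int)),
        cf (branchA f k v' d' x y n).1 ≤ cf v' ∧
          (shape2 v' n → shape2 (branchA f k v' d' x y n).1 n) := by
      intro k v' d'
      unfold branchA
      split_ifs <;>
        first
          | exact ⟨le_refl _, fun h => h⟩
          | exact ⟨(ih _ _ _ _ _).1, fun h => (ih _ _ _ _ _).2 h⟩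
    rw [recA_succ]
    simp only [stA]
    obtain ⟨a0, s0⟩ := hb 0 (g2set v x y true) d
    obtain ⟨a1, s1⟩ := hb 1 (branchA f 0 (g2set v x y true) d x y n).1
      (branchA f 0 (g2set v x y true) d x y n).2
    obtain ⟨a2, s2⟩ := hb 2 (branchA f 1 (branchA f 0 (g2set v x y true) d x y n).1
        (branchA f 0 (g2set v x y true) d x y n).2 x y n).1
      (branchA f 1 (branchA f 0 (g2set v x y true) d x y n).1
        (branchA f 0 (g2set v x y true) d x y n).2 x y n).2
    exact ⟨le_trans a2 (le_trans a1 (le_trans a0 (cf_g2set_le v x y))),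
      fun h => s2 (s1 (s0 (shape2_g2set _ _ _ _ _ h)))⟩

lemma branchA_facts (f k : Nat) (v : List (List Bool)) (d : List (List Int)) (x y n : Int) :
    cf (branchA f k v d x y n).1 ≤ cf v ∧
      (shape2 v n → shape2 (branchA f k v d x y n).1 n) := by
  unfold branchA
  split_ifs <;>
    first
      | exact ⟨le_refl _, fun h => h⟩
      | exact ⟨(recA_facts f _ _ _ _ _).1, fun h => (recA_facts f _ _ _ _ _).2 h⟩

-- any sufficient fuel computes the same result
lemma recA_fuel_indep : ∀ (f : Nat), ∀ (g : Nat) (v : List (List Bool)) (d : List (List Int))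
    (x y n : Int), shape2 v n → 0 ≤ x → x < n → 0 ≤ y → y < n →
    cf (g2set v x y true) < f → cf (g2set v x y true) < g →
    recA f v d x y n = recA g v d x y n := by
  intro f
  induction f using Nat.strong_induction_on with
  | _ f IH =>
  intro g v d x y n hsh hx0 hxn hy0 hyn hf hg
  have hcf0 : 0 ≤ cf (g2set v x y true) := Nat.zero_le _
  obtain ⟨f', rfl⟩ : ∃ t, f = t + 1 := ⟨f - 1, by omega⟩
  obtain ⟨g', rfl⟩ : ∃ t, g = t + 1 := ⟨g - 1, by omega⟩
  rw [recA_succ, recA_succ]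
  have hshm : shape2 (g2set v x y true) n := shape2_g2set _ _ _ _ _ hsh
  have hb : ∀ (k : Nat) (v' : List (List Bool)) (d' : List (List Int)), shape2 v' n →
      cf v' ≤ cf (g2set v x y true) →
      branchA f' k v' d' x y n = branchA g' k v' d' x y n := by
    intro k v' d' hsh' hle
    unfold branchA
    split_ifs with hk0 hc0 hk1 hc1 hc2
    · obtain ⟨hlt, hunv⟩ := hc0
      have hcx : (x + 1).toNat < v'.length := by rw [hsh'.1]; omega
      have hcy : y.toNat < (v'.getD (x + 1).toNat []).length := by
        rw [row_len_of_shape2 v' n (x + 1) hsh' hcx]; omega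
      have hdec := cf_g2set_true v' (x + 1) y hcx hcy hunv
      exact IH f' (by omega) g' v' _ (x + 1) y n hsh' (by omega) hlt hy0 hyn
        (by omega) (by omega)
    · rfl
    · obtain ⟨hlt, hunv⟩ := hc1
      have hcx : (x - 1).toNat < v'.length := by rw [hsh'.1]; omega
      have hcy : y.toNat < (v'.getD (x - 1).toNat []).length := by
        rw [row_len_of_shape2 v' n (x - 1) hsh' hcx]; omega
      have hdec := cf_g2set_true v' (x - 1) y hcx hcy hunv
      exact IH f' (by omega) g' v' _ (x - 1) y n hsh' (by omega) (by omega) hy0 hyn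
        (by omega) (by omega)
    · rfl
    · obtain ⟨hlt, hunv⟩ := hc2
      have hcx : x.toNat < v'.length := by rw [hsh'.1]; omega
      have hcy : (y + 1).toNat < (v'.getD x.toNat []).length := by
        rw [row_len_of_shape2 v' n x hsh' hcx]; omega
      have hdec := cf_g2set_true v' x (y + 1) hcx hcy hunv
      exact IH f' (by omega) g' v' _ x (y + 1) n hsh' hx0 hxn (by omega) hlt
        (by omega) (by omega)
    · rfl
  simp only [stA]
  rw [hb 0 (g2set v x y true) d hshm (le_refl _)]
  have bf0 := branchA_facts g' 0 (g2set v x y true) d x y n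
  rw [hb 1 (branchA g' 0 (g2set v x y true) d x y n).1
    (branchA g' 0 (g2set v x y true) d x y n).2 (bf0.2 hshm) bf0.1]
  have bf1 := branchA_facts g' 1 (branchA g' 0 (g2set v x y true) d x y n).1
    (branchA g' 0 (g2set v x y true) d x y n).2 x y n
  rw [hb 2 _ _ (bf1.2 (bf0.2 hshm)) (le_trans bf1.1 bf0.1)]

lemma stA_facts (f k : Nat) (v : List (List Bool)) (d : List (List Int)) (x y n : Int) :
    cf (stA f k v d x y n).1 ≤ cf v ∧
      (shape2 v n → shape2 (stA f k v d x y n).1 n) := by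
  match k with
  | 0 =>
    simp only [stA]
    obtain ⟨a0, s0⟩ := branchA_facts f 0 v d x y n
    obtain ⟨a1, s1⟩ := branchA_facts f 1 (branchA f 0 v d x y n).1 (branchA f 0 v d x y n).2 x y n
    obtain ⟨a2, s2⟩ := branchA_facts f 2
      (branchA f 1 (branchA f 0 v d x y n).1 (branchA f 0 v d x y n).2 x y n).1
      (branchA f 1 (branchA f 0 v d x y n).1 (branchA f 0 v d x y n).2 x y n).2 x y n
    exact ⟨le_trans a2 (le_trans a1 a0), fun h => s2 (s1 (s0 h))⟩
  | 1 =>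
    simp only [stA]
    obtain ⟨a1, s1⟩ := branchA_facts f 1 v d x y n
    obtain ⟨a2, s2⟩ := branchA_facts f 2 (branchA f 1 v d x y n).1 (branchA f 1 v d x y n).2 x y n
    exact ⟨le_trans a2 a1, fun h => s2 (s1 h)⟩
  | 2 => exact branchA_facts f 2 v d x y n
  | (m + 3) => exact ⟨le_refl _, fun h => h⟩

lemma runB_nil (f : Nat) (v : List (List Bool)) (d : List (List Int)) (n : Int) :
    runB f [] v d n = (v, d) := by
  cases f <;> rfl

-- THE SIMULATION: from a frame (x,y,k) the stack machine computes exactly the remaining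
-- branches stA f k of the recursion, consuming exactly 4*(cells it visits) + (4-k) steps.
lemma sim : ∀ (N : Nat), ∀ (k : Nat) (v : List (List Bool)) (d : List (List Int))
    (rest : List (Int × Int × Nat)) (x y n : Int) (f fB : Nat),
    k ≤ 3 → shape2 v n → 0 ≤ x → x < n → 0 ≤ y → y < n →
    cf v ≤ f → 4 * cf v + (4 - k) ≤ N → 4 * cf v + (4 - k) ≤ fB →
    ∃ f1, fB = f1 + (4 * (cf v - cf (stA f k v d x y n).1) + (4 - k)) ∧
      runB fB ((x, y, k) :: rest) v d n =
        runB f1 rest (stA f k v d x y n).1 (stA f k v d x y n).2 n := by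
  intro N
  induction N using Nat.strong_induction_on with
  | _ N IH =>
  intro k v d rest x y n f fB hk hsh hx0 hxn hy0 hyn hvf hN hfB
  obtain ⟨fB', rfl⟩ : ∃ t, fB = t + 1 := ⟨fB - 1, by omega⟩
  interval_cases k
  · -- k = 0: direction (x+1, y)
    have hstep : runB (fB' + 1) ((x, y, 0) :: rest) v d n =
        (if 0 ≤ x + 1 ∧ x + 1 < n ∧ 0 ≤ y ∧ y < n ∧ g2get v (x + 1) y false = false then
            runB fB' ((x + 1, y, 0) :: (x, y, 1) :: rest) (g2set v (x + 1) y true)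
              (g2set d (x + 1) y (g2get d x y 0 + 1)) n
          else runB fB' ((x, y, 1) :: rest) v d n) := by
      simp [runB, dirB]
    by_cases hg : x + 1 < n ∧ g2get v (x + 1) y false = false
    · obtain ⟨hlt, hunv⟩ := hg
      have hgB : 0 ≤ x + 1 ∧ x + 1 < n ∧ 0 ≤ y ∧ y < n ∧ g2get v (x + 1) y false = false :=
        ⟨by omega, hlt, hy0, hyn, hunv⟩
      have hcx : (x + 1).toNat < v.length := by rw [hsh.1]; omega
      have hcy : y.toNat < (v.getD (x + 1).toNat []).length := by
        rw [row_len_of_shape2 v n (x + 1) hsh hcx]; omega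
      have hdec := cf_g2set_true v (x + 1) y hcx hcy hunv
      have hcf1 : 1 ≤ cf v := by omega
      obtain ⟨f'', rfl⟩ : ∃ t, f = t + 1 := ⟨f - 1, by omega⟩
      have hshv' : shape2 (g2set v (x + 1) y true) n := shape2_g2set _ _ _ _ _ hsh
      obtain ⟨f1, he1, hr1⟩ := IH (4 * cf (g2set v (x + 1) y true) + 4) (by omega) 0
        (g2set v (x + 1) y true) (g2set d (x + 1) y (g2get d x y 0 + 1))
        ((x, y, 1) :: rest) (x + 1) y n (f'' + 1) fB'
        (by omega) hshv' (by omega) hlt hy0 hyn (by omega) (le_refl _) (by omega)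
      have hbridge : branchA (f'' + 1) 0 v d x y n =
          stA (f'' + 1) 0 (g2set v (x + 1) y true)
            (g2set d (x + 1) y (g2get d x y 0 + 1)) (x + 1) y n := by
        have e2 : branchA (f'' + 1) 0 v d x y n =
            recA (f'' + 1) v (g2set d (x + 1) y (g2get d x y 0 + 1)) (x + 1) y n := by
          simp [branchA, hlt, hunv]
        have e3 : recA (f'' + 1) v (g2set d (x + 1) y (g2get d x y 0 + 1)) (x + 1) y n =
            recA (f'' + 2) v (g2set d (x + 1) y (g2get d x y 0 + 1)) (x + 1) y n :=
          recA_fuel_indep (f'' + 1) (f'' + 2) v _ (x + 1) y n hsh (by omega) hlt hy0 hyn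
            (by omega) (by omega)
        rw [e2, e3, recA_succ]
      set s1 := stA (f'' + 1) 0 (g2set v (x + 1) y true)
        (g2set d (x + 1) y (g2get d x y 0 + 1)) (x + 1) y n with hs1def
      have hs1 := stA_facts (f'' + 1) 0 (g2set v (x + 1) y true)
        (g2set d (x + 1) y (g2get d x y 0 + 1)) (x + 1) y n
      rw [← hs1def] at hs1
      have hs1cf : cf s1.1 ≤ cf v - 1 := by omega
      have hs1sh : shape2 s1.1 n := hs1.2 hshv'
      obtain ⟨f2, he2, hr2⟩ := IH (4 * cf s1.1 + 3) (by omega) 1 s1.1 s1.2 rest x y n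
        (f'' + 1) f1 (by omega) hs1sh hx0 hxn hy0 hyn (by omega) (le_refl _) (by omega)
      have hfin : stA (f'' + 1) 0 v d x y n = stA (f'' + 1) 1 s1.1 s1.2 x y n := by
        rw [stA_step (f'' + 1) 0 (by omega) v d x y n, hbridge]
      refine ⟨f2, ?_, ?_⟩
      · rw [hfin]
        have hmono := (stA_facts (f'' + 1) 1 s1.1 s1.2 x y n).1
        omega
      · rw [hstep, if_pos hgB, hr1, hr2, hfin]
    · have hgB : ¬(0 ≤ x + 1 ∧ x + 1 < n ∧ 0 ≤ y ∧ y < n ∧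
          g2get v (x + 1) y false = false) := by
        intro hh; exact hg ⟨hh.2.1, hh.2.2.2.2⟩
      have hb0 : branchA f 0 v d x y n = (v, d) := by
        simp [branchA, hg]
      obtain ⟨f1, he1, hr1⟩ := IH (4 * cf v + 3) (by omega) 1 v d rest x y n f fB'
        (by omega) hsh hx0 hxn hy0 hyn hvf (le_refl _) (by omega)
      have hfin : stA f 0 v d x y n = stA f 1 v d x y n := by
        rw [stA_step f 0 (by omega) v d x y n, hb0]
      refine ⟨f1, ?_, ?_⟩
      · rw [hfin]; omega
      · rw [hstep, if_neg hgB, hr1, hfin]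
  · -- k = 1: direction (x-1, y)
    have hstep : runB (fB' + 1) ((x, y, 1) :: rest) v d n =
        (if 0 ≤ x - 1 ∧ x - 1 < n ∧ 0 ≤ y ∧ y < n ∧ g2get v (x - 1) y false = false then
            runB fB' ((x - 1, y, 0) :: (x, y, 2) :: rest) (g2set v (x - 1) y true)
              (g2set d (x - 1) y (g2get d x y 0 + 1)) n
          else runB fB' ((x, y, 2) :: rest) v d n) := by
      simp [runB, dirB, ← sub_eq_add_neg]
    by_cases hg : -1 < x - 1 ∧ g2get v (x - 1) y false = false
    · obtain ⟨hlt, hunv⟩ := hg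
      have hgB : 0 ≤ x - 1 ∧ x - 1 < n ∧ 0 ≤ y ∧ y < n ∧ g2get v (x - 1) y false = false :=
        ⟨by omega, by omega, hy0, hyn, hunv⟩
      have hcx : (x - 1).toNat < v.length := by rw [hsh.1]; omega
      have hcy : y.toNat < (v.getD (x - 1).toNat []).length := by
        rw [row_len_of_shape2 v n (x - 1) hsh hcx]; omega
      have hdec := cf_g2set_true v (x - 1) y hcx hcy hunv
      have hcf1 : 1 ≤ cf v := by omega
      obtain ⟨f'', rfl⟩ : ∃ t, f = t + 1 := ⟨f - 1, by omega⟩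
      have hshv' : shape2 (g2set v (x - 1) y true) n := shape2_g2set _ _ _ _ _ hsh
      obtain ⟨f1, he1, hr1⟩ := IH (4 * cf (g2set v (x - 1) y true) + 4) (by omega) 0
        (g2set v (x - 1) y true) (g2set d (x - 1) y (g2get d x y 0 + 1))
        ((x, y, 2) :: rest) (x - 1) y n (f'' + 1) fB'
        (by omega) hshv' (by omega) (by omega) hy0 hyn (by omega) (le_refl _) (by omega)
      have hbridge : branchA (f'' + 1) 1 v d x y n =
          stA (f'' + 1) 0 (g2set v (x - 1) y true)
            (g2set d (x - 1) y (g2get d x y 0 + 1)) (x - 1) y n := by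
        have e2 : branchA (f'' + 1) 1 v d x y n =
            recA (f'' + 1) v (g2set d (x - 1) y (g2get d x y 0 + 1)) (x - 1) y n := by
          simp [branchA, hlt, hunv]
        have e3 : recA (f'' + 1) v (g2set d (x - 1) y (g2get d x y 0 + 1)) (x - 1) y n =
            recA (f'' + 2) v (g2set d (x - 1) y (g2get d x y 0 + 1)) (x - 1) y n :=
          recA_fuel_indep (f'' + 1) (f'' + 2) v _ (x - 1) y n hsh (by omega) (by omega)
            hy0 hyn (by omega) (by omega)
        rw [e2, e3, recA_succ]
      set s1 := stA (f'' + 1) 0 (g2set v (x - 1) y true)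
        (g2set d (x - 1) y (g2get d x y 0 + 1)) (x - 1) y n with hs1def
      have hs1 := stA_facts (f'' + 1) 0 (g2set v (x - 1) y true)
        (g2set d (x - 1) y (g2get d x y 0 + 1)) (x - 1) y n
      rw [← hs1def] at hs1
      have hs1cf : cf s1.1 ≤ cf v - 1 := by omega
      have hs1sh : shape2 s1.1 n := hs1.2 hshv'
      obtain ⟨f2, he2, hr2⟩ := IH (4 * cf s1.1 + 2) (by omega) 2 s1.1 s1.2 rest x y n
        (f'' + 1) f1 (by omega) hs1sh hx0 hxn hy0 hyn (by omega) (le_refl _) (by omega)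
      have hfin : stA (f'' + 1) 1 v d x y n = stA (f'' + 1) 2 s1.1 s1.2 x y n := by
        rw [stA_step (f'' + 1) 1 (by omega) v d x y n, hbridge]
      refine ⟨f2, ?_, ?_⟩
      · rw [hfin]
        have hmono := (stA_facts (f'' + 1) 2 s1.1 s1.2 x y n).1
        omega
      · rw [hstep, if_pos hgB, hr1, hr2, hfin]
    · have hgB : ¬(0 ≤ x - 1 ∧ x - 1 < n ∧ 0 ≤ y ∧ y < n ∧
          g2get v (x - 1) y false = false) := by
        intro hh; exact hg ⟨by omega, hh.2.2.2.2⟩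
      have hb0 : branchA f 1 v d x y n = (v, d) := by
        simp only [branchA]
        rw [if_neg (by norm_num : ¬(1 : Nat) = 0), if_pos trivial, if_neg hg]
      obtain ⟨f1, he1, hr1⟩ := IH (4 * cf v + 2) (by omega) 2 v d rest x y n f fB'
        (by omega) hsh hx0 hxn hy0 hyn hvf (le_refl _) (by omega)
      have hfin : stA f 1 v d x y n = stA f 2 v d x y n := by
        rw [stA_step f 1 (by omega) v d x y n, hb0]
      refine ⟨f1, ?_, ?_⟩
      · rw [hfin]; omega
      · rw [hstep, if_neg hgB, hr1, hfin]
  · -- k = 2: direction (x, y+1)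
    have hstep : runB (fB' + 1) ((x, y, 2) :: rest) v d n =
        (if 0 ≤ x ∧ x < n ∧ 0 ≤ y + 1 ∧ y + 1 < n ∧ g2get v x (y + 1) false = false then
            runB fB' ((x, y + 1, 0) :: (x, y, 3) :: rest) (g2set v x (y + 1) true)
              (g2set d x (y + 1) (g2get d x y 0 + 1)) n
          else runB fB' ((x, y, 3) :: rest) v d n) := by
      simp [runB, dirB]
    by_cases hg : y + 1 < n ∧ g2get v x (y + 1) false = false
    · obtain ⟨hlt, hunv⟩ := hg
      have hgB : 0 ≤ x ∧ x < n ∧ 0 ≤ y + 1 ∧ y + 1 < n ∧ g2get v x (y + 1) false = false :=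
        ⟨hx0, hxn, by omega, hlt, hunv⟩
      have hcx : x.toNat < v.length := by rw [hsh.1]; omega
      have hcy : (y + 1).toNat < (v.getD x.toNat []).length := by
        rw [row_len_of_shape2 v n x hsh hcx]; omega
      have hdec := cf_g2set_true v x (y + 1) hcx hcy hunv
      have hcf1 : 1 ≤ cf v := by omega
      obtain ⟨f'', rfl⟩ : ∃ t, f = t + 1 := ⟨f - 1, by omega⟩
      have hshv' : shape2 (g2set v x (y + 1) true) n := shape2_g2set _ _ _ _ _ hsh
      obtain ⟨f1, he1, hr1⟩ := IH (4 * cf (g2set v x (y + 1) true) + 4) (by omega) 0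
        (g2set v x (y + 1) true) (g2set d x (y + 1) (g2get d x y 0 + 1))
        ((x, y, 3) :: rest) x (y + 1) n (f'' + 1) fB'
        (by omega) hshv' hx0 hxn (by omega) hlt (by omega) (le_refl _) (by omega)
      have hbridge : branchA (f'' + 1) 2 v d x y n =
          stA (f'' + 1) 0 (g2set v x (y + 1) true)
            (g2set d x (y + 1) (g2get d x y 0 + 1)) x (y + 1) n := by
        have e2 : branchA (f'' + 1) 2 v d x y n =
            recA (f'' + 1) v (g2set d x (y + 1) (g2get d x y 0 + 1)) x (y + 1) n := by
          simp [branchA, hlt, hunv]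
        have e3 : recA (f'' + 1) v (g2set d x (y + 1) (g2get d x y 0 + 1)) x (y + 1) n =
            recA (f'' + 2) v (g2set d x (y + 1) (g2get d x y 0 + 1)) x (y + 1) n :=
          recA_fuel_indep (f'' + 1) (f'' + 2) v _ x (y + 1) n hsh hx0 hxn (by omega) hlt
            (by omega) (by omega)
        rw [e2, e3, recA_succ]
      set s1 := stA (f'' + 1) 0 (g2set v x (y + 1) true)
        (g2set d x (y + 1) (g2get d x y 0 + 1)) x (y + 1) n with hs1def
      have hs1 := stA_facts (f'' + 1) 0 (g2set v x (y + 1) true)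
        (g2set d x (y + 1) (g2get d x y 0 + 1)) x (y + 1) n
      rw [← hs1def] at hs1
      have hs1cf : cf s1.1 ≤ cf v - 1 := by omega
      have hs1sh : shape2 s1.1 n := hs1.2 hshv'
      obtain ⟨f2, he2, hr2⟩ := IH (4 * cf s1.1 + 1) (by omega) 3 s1.1 s1.2 rest x y n
        (f'' + 1) f1 (by omega) hs1sh hx0 hxn hy0 hyn (by omega) (le_refl _) (by omega)
      have hfin : stA (f'' + 1) 2 v d x y n = stA (f'' + 1) 3 s1.1 s1.2 x y n := by
        rw [stA_step (f'' + 1) 2 (by omega) v d x y n, hbridge]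
      refine ⟨f2, ?_, ?_⟩
      · rw [hfin]
        have hmono := (stA_facts (f'' + 1) 3 s1.1 s1.2 x y n).1
        omega
      · rw [hstep, if_pos hgB, hr1, hr2, hfin]
    · have hgB : ¬(0 ≤ x ∧ x < n ∧ 0 ≤ y + 1 ∧ y + 1 < n ∧
          g2get v x (y + 1) false = false) := by
        intro hh; exact hg ⟨hh.2.2.2.1, hh.2.2.2.2⟩
      have hb0 : branchA f 2 v d x y n = (v, d) := by
        simp [branchA, hg]
      obtain ⟨f1, he1, hr1⟩ := IH (4 * cf v + 1) (by omega) 3 v d rest x y n f fB'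
        (by omega) hsh hx0 hxn hy0 hyn hvf (le_refl _) (by omega)
      have hfin : stA f 2 v d x y n = stA f 3 v d x y n := by
        rw [stA_step f 2 (by omega) v d x y n, hb0]
      refine ⟨f1, ?_, ?_⟩
      · rw [hfin]; omega
      · rw [hstep, if_neg hgB, hr1, hfin]
  · -- k = 3: pop
    refine ⟨fB', by simp only [stA]; omega, ?_⟩
    simp only [stA]
    simp [runB]

-- grid initialisation: the two ports build the same starting grids
lemma cf_le_shape (v : List (List Bool)) (n : Int) (h : shape2 v n) :
    cf v ≤ n.toNat * n.toNat := by
  have hb : ∀ x ∈ v.map (fun r => r.count false), x ≤ n.toNat := by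
    intro x hx
    obtain ⟨r, hr, rfl⟩ := List.mem_map.mp hx
    exact le_trans (List.count_le_length) (le_of_eq (h.2 r hr))
  calc cf v ≤ (v.map (fun r => r.count false)).length • n.toNat :=
        List.sum_le_card_nsmul _ _ hb
    _ = n.toNat * n.toNat := by rw [List.length_map, h.1, smul_eq_mul]

lemma distInit_eq (L : List (List String)) :
    (L.map (fun _ => List.replicate L.length (0 : Int))) =
      ((List.range L.length).map (fun _ => (List.range L.length).map (fun _ => (0 : Int)))) := by
  simp [List.map_const', List.length_range]

lemma markRow_len (L : List (List String)) (i : Nat) (js : List Nat) (v : List (List Bool)) :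
    (js.foldl (fun v j => if (L.getD i []).getD j "" = "#" then g2set v (↑i) (↑j) true else v)
      v).length = v.length := by
  induction js generalizing v with
  | nil => rfl
  | cons j js ih =>
    simp only [List.foldl_cons]
    rw [ih]
    split <;> simp [g2set_length]

lemma markRow_rowlen (L : List (List String)) (i : Nat) (js : List Nat) (v : List (List Bool))
    (p : Nat) :
    ((js.foldl (fun v j => if (L.getD i []).getD j "" = "#" then g2set v (↑i) (↑j) true else v)
      v).getD p []).length = (v.getD p []).length := by
  induction js generalizing v with
  | nil => rfl
  | cons j js ih =>
    simp only [List.foldl_cons]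
    rw [ih]
    split
    · exact g2set_row_len v (↑i) (↑j) true p
    · rfl

lemma markRow_get (L : List (List String)) (i : Nat) (js : List Nat) (v : List (List Bool))
    (a b : Nat) (hi : i < v.length) (hjs : ∀ j ∈ js, j < (v.getD i []).length) :
    g2get (js.foldl (fun v j => if (L.getD i []).getD j "" = "#" then g2set v (↑i) (↑j) true
        else v) v) (↑a) (↑b) false =
      if a = i ∧ b ∈ js ∧ (L.getD i []).getD b "" = "#" then true
      else g2get v (↑a) (↑b) false := by
  induction js generalizing v with
  | nil => simp
  | cons j js ih =>
    simp only [List.foldl_cons]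
    have hi' : i < (if (L.getD i []).getD j "" = "#" then g2set v (↑i) (↑j) true
        else v).length := by
      split <;> simpa [g2set_length] using hi
    have hrl : ((if (L.getD i []).getD j "" = "#" then g2set v (↑i) (↑j) true
        else v).getD i []).length = (v.getD i []).length := by
      split
      · exact g2set_row_len v (↑i) (↑j) true i
      · rfl
    rw [ih _ hi' (by rw [hrl]; exact fun j' hj' => hjs j' (List.mem_cons_of_mem _ hj'))]
    by_cases hc : (L.getD i []).getD j "" = "#"
    · rw [if_pos hc]
      rw [g2get_g2set v i j a b true false hi (hjs j List.mem_cons_self)]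
      by_cases ha : a = i <;> by_cases hbj : b = j <;> by_cases hbm : b ∈ js <;>
        simp_all [List.mem_cons]
    · rw [if_neg hc]
      by_cases ha : a = i <;> by_cases hbj : b = j <;> simp_all [List.mem_cons]

lemma markAll_len (L : List (List String)) (is : List Nat) (v : List (List Bool)) :
    (is.foldl (fun v i => (List.range L.length).foldl
        (fun v j => if (L.getD i []).getD j "" = "#" then g2set v (↑i) (↑j) true else v) v)
      v).length = v.length := by
  induction is generalizing v with
  | nil => rfl
  | cons i is ih =>
    simp only [List.foldl_cons]
    rw [ih, markRow_len]

lemma markAll_rowlen (L : List (List String)) (is : List Nat) (v : List (List Bool)) (p : Nat) :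
    ((is.foldl (fun v i => (List.range L.length).foldl
        (fun v j => if (L.getD i []).getD j "" = "#" then g2set v (↑i) (↑j) true else v) v)
      v).getD p []).length = (v.getD p []).length := by
  induction is generalizing v with
  | nil => rfl
  | cons i is ih =>
    simp only [List.foldl_cons]
    rw [ih, markRow_rowlen]

lemma markAll_get (L : List (List String)) (is : List Nat) (v : List (List Bool)) (a b : Nat)
    (hlen : ∀ i ∈ is, i < v.length)
    (hrow : ∀ i ∈ is, ∀ j : Nat, j < L.length → j < (v.getD i []).length) :
    g2get (is.foldl (fun v i => (List.range L.length).foldl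
        (fun v j => if (L.getD i []).getD j "" = "#" then g2set v (↑i) (↑j) true else v) v)
      v) (↑a) (↑b) false =
      if a ∈ is ∧ b < L.length ∧ (L.getD a []).getD b "" = "#" then true
      else g2get v (↑a) (↑b) false := by
  induction is generalizing v with
  | nil => simp
  | cons i is ih =>
    simp only [List.foldl_cons]
    rw [ih _ (fun i' h => by rw [markRow_len]; exact hlen i' (List.mem_cons_of_mem _ h))
      (fun i' h j hj => by rw [markRow_rowlen]; exact hrow i' (List.mem_cons_of_mem _ h) j hj)]
    rw [markRow_get L i (List.range L.length) v a b (hlen i List.mem_cons_self)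
      (fun j hj => hrow i List.mem_cons_self j (List.mem_range.mp hj))]
    by_cases ha : a = i
    · subst ha
      clear ih hlen hrow
      by_cases hbl : b < L.length <;> by_cases hcell : (L.getD a []).getD b "" = "#" <;>
        simp_all [List.mem_cons, List.mem_range]
    · simp [ha, List.mem_cons]

lemma base_get (m : Nat) (a b : Nat) :
    g2get ((List.range m).map (fun _ => (List.range m).map (fun _ => false))) (↑a) (↑b)
      false = false := by
  unfold g2get
  simp only [Int.toNat_natCast, List.map_const', List.length_range]
  by_cases ha : a < m
  · rw [List.getD_eq_getElem (List.replicate m (List.replicate m false)) []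
      (by simpa using ha)]
    simp only [List.getElem_replicate]
    by_cases hb : b < m
    · rw [List.getD_eq_getElem (List.replicate m false) false (by simpa using hb)]
      simp
    · rw [List.getD_eq_default (List.replicate m false) false (by simpa using hb)]
  · rw [List.getD_eq_default (List.replicate m (List.replicate m false)) []
      (by simpa using ha)]
    simp

lemma initVisA_get (L : List (List String)) (a b : Nat) :
    g2get (initVisA L) (↑a) (↑b) false =
      if a < L.length ∧ b < L.length ∧ (L.getD a []).getD b "" = "#" then true
      else false := by
  unfold initVisA
  rw [markAll_get L (List.range L.length) _ a b
    (fun i hi => by simpa using List.mem_range.mp hi)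
    (fun i hi j hj => by
      by_cases him : i < L.length
      · rw [List.getD_eq_getElem _ _ (by simpa using him)]
        simp only [List.getElem_map]
        simpa using hj
      · exact absurd (List.mem_range.mp hi) him)]
  rw [base_get]
  simp [List.mem_range]

lemma visInit_eq (L : List (List String)) (h : ∀ r ∈ L, L.length ≤ r.length) :
    (L.map (fun row => (row.take L.length).map (fun c => c == "#"))) = initVisA L := by
  have hlenA : (initVisA L).length = L.length := by
    unfold initVisA; rw [markAll_len]; simp
  apply List.ext_getElem
  · simp [hlenA]
  · intro i h1 h2
    simp only [List.getElem_map]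
    have hi : i < L.length := by simpa using h1
    have hrowlenA : ((initVisA L).getD i []).length = L.length := by
      unfold initVisA
      rw [markAll_rowlen]
      rw [List.getD_eq_getElem _ _ (by simpa using hi)]
      simp
    have hLi : L.length ≤ (L[i]).length := h (L[i]) (List.getElem_mem hi)
    apply List.ext_getElem
    · rw [← List.getD_eq_getElem (initVisA L) [] h2, hrowlenA]
      simp
      exact hLi
    · intro j hj1 hj2
      have hj : j < L.length := by
        rw [← List.getD_eq_getElem (initVisA L) [] h2, hrowlenA] at hj2
        exact hj2
      have hgA : g2get (initVisA L) (↑i) (↑j) false = (initVisA L)[i][j] := by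
        unfold g2get
        simp only [Int.toNat_natCast]
        rw [List.getD_eq_getElem (initVisA L) [] h2,
          List.getD_eq_getElem ((initVisA L)[i]) false hj2]
      rw [← hgA, initVisA_get L i j]
      simp only [List.getElem_map, List.getElem_take]
      have hcell : (L.getD i []).getD j "" = L[i][j] := by
        rw [List.getD_eq_getElem L [] hi,
          List.getD_eq_getElem (L[i]) "" (lt_of_lt_of_le hj hLi)]
      have hcell2 : (L[i])[j]?.getD "" = L[i][j] := by
        simp [List.getElem?_eq_getElem (lt_of_lt_of_le hj hLi)]
      by_cases hc : L[i][j] = "#"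
      · simp [hi, hj, hcell2, hc]
      · simp [hi, hj, hcell2, hc]

lemma shape2_visInit (L : List (List String)) (h : ∀ r ∈ L, L.length ≤ r.length) :
    shape2 (L.map (fun row => (row.take L.length).map (fun c => c == "#"))) (L.length : Int) := by
  constructor
  · simp
  · intro r hr
    obtain ⟨row, hrow, rfl⟩ := List.mem_map.mp hr
    simp
    exact h row hrow

-- ===== VERDICT (by name: the statement is the Claim_ definition above) =====
theorem DFS_spec : Claim_equal_DFS := by
  intro L _ hpre
  obtain ⟨hn, hrows⟩ := hpre
  unfold Spec_DFS
  show DFS L = DFS_alt L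
  simp only [DFS, DFS_alt]
  rw [visInit_eq L hrows, distInit_eq L]
  have hshape0 : shape2 (initVisA L) (L.length : Int) := by
    rw [← visInit_eq L hrows]; exact shape2_visInit L hrows
  have hcf0 : cf (initVisA L) ≤ L.length * L.length := by
    have := cf_le_shape (initVisA L) (L.length : Int) hshape0
    simpa using this
  have hshm : shape2 (g2set (initVisA L) 0 0 true) (L.length : Int) :=
    shape2_g2set _ _ _ _ _ hshape0
  have hcfm : cf (g2set (initVisA L) 0 0 true) ≤ L.length * L.length :=
    le_trans (cf_g2set_le _ _ _) hcf0
  have hnI : (0 : Int) < (L.length : Int) := by exact_mod_cast hn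
  rw [recA_succ]
  obtain ⟨f1, _, hrun⟩ := sim (4 * cf (g2set (initVisA L) 0 0 true) + 4) 0
    (g2set (initVisA L) 0 0 true)
    ((List.range L.length).map (fun _ => (List.range L.length).map (fun _ => (0 : Int))))
    [] 0 0 (L.length : Int) (L.length * L.length) (4 * L.length * L.length + 4)
    (by omega) hshm (le_refl 0) hnI (le_refl 0) hnI hcfm (le_refl _)
    (by have h4 : 4 * L.length * L.length = 4 * (L.length * L.length) := by ring
        omega)
  rw [hrun, runB_nil]
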